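-- pv_equiv track=rewrite | github.com/tiefling-cat/apertium-rules | coverage.py | parse_coverage
-- ===== SOURCE A (Python) =====
-- def parse_coverage(coverage):
--     """
--     Get a list representing one coverage
--     (as output by calculate_coverage_r) and return
--     a list where elements are groups (list_of_words, rule).
--     """
--     groups = []
--     current_group = []
--     for token in coverage:
--         if token[0] == 'w':
--             current_group.append(token[1])
--         elif token[0] == 'r':
--             groups.append((current_group, token[1:]))
--             current_group = []
--     return groups
-- ===== SOURCE B (Python) =====
-- def parse_coverage(coverage):
--     """
--     Get a list representing one coverage
--     (as output by calculate_coverage_r) and return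
--     a list where elements are groups (list_of_words, rule).
--     """
--     groups = []
--     start = 0
--     for i, token in enumerate(coverage):
--         if token[0] == 'r':
--             groups.append(([t[1] for t in coverage[start:i] if t[0] == 'w'],
--                            token[1:]))
--             start = i + 1
--     return groups
-- ===== Notes on version B (the rewrite author's own statement) =====
-- stated objective: alternative
-- what changed: B replaces A's incrementally accumulated current_group with an enumerate scan that keeps only a start index and, at each rule token, derives the group's words by slicing-and-filtering coverage[start:i]; trailing words after the last rule are never touched.
import Mathlib
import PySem

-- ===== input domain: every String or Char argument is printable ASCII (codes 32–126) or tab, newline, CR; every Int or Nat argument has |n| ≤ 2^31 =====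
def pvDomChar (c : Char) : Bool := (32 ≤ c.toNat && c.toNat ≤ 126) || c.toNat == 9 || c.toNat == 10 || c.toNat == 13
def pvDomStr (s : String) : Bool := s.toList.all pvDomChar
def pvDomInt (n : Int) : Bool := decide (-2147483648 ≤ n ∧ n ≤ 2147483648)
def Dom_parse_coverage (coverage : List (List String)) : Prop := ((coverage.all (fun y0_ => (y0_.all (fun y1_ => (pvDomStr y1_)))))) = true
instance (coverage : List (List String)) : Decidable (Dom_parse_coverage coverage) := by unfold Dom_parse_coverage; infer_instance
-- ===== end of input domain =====

-- B groups coverage tokens by scanning with a start index and slicing-and-filtering at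
-- each rule token, instead of A's incrementally accumulated current_group (alternative
-- decomposition, same asymptotic cost).

-- ===== PORT A =====
-- A: one fold over the tokens carrying (groups, current_group).
def parse_coverage (coverage : List (List String)) : List (List String × List String) :=
  (coverage.foldl
    (fun (acc : List (List String × List String) × List String) token =>
      if PySem.List.pyGetD token 0 "" = "w" then
        (acc.1, acc.2 ++ [PySem.List.pyGetD token 1 ""])
      else if PySem.List.pyGetD token 0 "" = "r" then
        (acc.1 ++ [(acc.2, PySem.List.slice token (some 1) none)], [])
      else acc)
    ([], [])).1

-- ===== PORT B =====
-- B: enumerate fold carrying (groups, start); at each rule token the group's words are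
-- the slice coverage[start:i] filtered to 'w' tokens and mapped to their second element.
def parse_coverage_alt (coverage : List (List String)) : List (List String × List String) :=
  ((PySem.List.enumerate coverage 0).foldl
    (fun (acc : List (List String × List String) × Int) p =>
      if PySem.List.pyGetD p.2 0 "" = "r" then
        (acc.1 ++ [(((PySem.List.slice coverage (some acc.2) (some p.1)).filter
                      (fun t => PySem.List.pyGetD t 0 "" = "w")).map
                      (fun t => PySem.List.pyGetD t 1 ""),
                    PySem.List.slice p.2 (some 1) none)],
         p.1 + 1)
      else acc)
    ([], 0)).1

-- ===== PRECONDITION & SPEC =====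
-- Pre_ excludes exactly the inputs on which A raises IndexError: a token that is the
-- empty list (token[0]), or a token headed 'w' with no second element (token[1]).
def Pre_parse_coverage (coverage : List (List String)) : Prop :=
  ∀ t ∈ coverage, t ≠ [] ∧ (PySem.List.pyGetD t 0 "" = "w" → 2 ≤ t.length)
instance (coverage : List (List String)) : Decidable (Pre_parse_coverage coverage) := by
  unfold Pre_parse_coverage; infer_instance

def pvWitness_parse_coverage : List (List String) :=
  [["w", "cat"], ["w", "dog"], ["r", "NP"], ["x"], ["w", "ran"], ["r", "VP", "extra"]]

def Spec_parse_coverage (coverage : List (List String)) (out : List (List String × List String)) : Prop := out = parse_coverage_alt coverage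
instance (coverage : List (List String)) (out : List (List String × List String)) : Decidable (Spec_parse_coverage coverage out) := by unfold Spec_parse_coverage; infer_instance

-- ===== CLAIM (what is proved, stated in full; the proofs are below) =====
def Claim_equal_parse_coverage : Prop := ∀ (coverage : List (List String)), Dom_parse_coverage coverage → Pre_parse_coverage coverage → Spec_parse_coverage coverage (parse_coverage coverage)

-- ===== LEMMAS AND PROOFS =====

-- Common recursive description of the grouping that both folds compute.
def pcGo : List (List String) → List String → List (List String × List String)
  | [], _ => []
  | t :: ts, cur =>
    if PySem.List.pyGetD t 0 "" = "w" then pcGo ts (cur ++ [PySem.List.pyGetD t 1 ""])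
    else if PySem.List.pyGetD t 0 "" = "r" then
      (cur, PySem.List.slice t (some 1) none) :: pcGo ts []
    else pcGo ts cur

-- the word list extracted from a segment, as B builds it
def pcWords (l : List (List String)) : List String :=
  (l.filter (fun t => PySem.List.pyGetD t 0 "" = "w")).map (fun t => PySem.List.pyGetD t 1 "")

lemma pcWords_append (l₁ l₂ : List (List String)) :
    pcWords (l₁ ++ l₂) = pcWords l₁ ++ pcWords l₂ := by
  simp [pcWords]

-- A's fold equals pcGo.
lemma foldA_eq (rest : List (List String)) (g : List (List String × List String))
    (cur : List String) :
    (rest.foldl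
      (fun (acc : List (List String × List String) × List String) token =>
        if PySem.List.pyGetD token 0 "" = "w" then
          (acc.1, acc.2 ++ [PySem.List.pyGetD token 1 ""])
        else if PySem.List.pyGetD token 0 "" = "r" then
          (acc.1 ++ [(acc.2, PySem.List.slice token (some 1) none)], [])
        else acc)
      (g, cur)).1 = g ++ pcGo rest cur := by
  induction rest generalizing g cur with
  | nil => simp [pcGo]
  | cons t ts ih =>
    by_cases hw : PySem.List.pyGetD t 0 "" = "w"
    · simp [pcGo, hw, ih]
    · by_cases hr : PySem.List.pyGetD t 0 "" = "r"
      · simp [pcGo, hw, hr, ih]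
      · simp [pcGo, hw, hr, ih]

-- appending the token at position i to the segment [s:i]
lemma take_segment_succ (full : List (List String)) (s i : Nat) (t : List String)
    (ts : List (List String)) (hs : s ≤ i) (hd : full.drop i = t :: ts) :
    (full.drop s).take (i + 1 - s) = (full.drop s).take (i - s) ++ [t] := by
  have hfi : full[i]? = some t := by
    have h0 : (full.drop i)[0]? = some t := by simp [hd]
    simpa [List.getElem?_drop] using h0
  have hseg : (full.drop s)[i - s]? = some t := by
    rw [List.getElem?_drop]
    rwa [Nat.add_sub_cancel' hs]
  have : i + 1 - s = (i - s) + 1 := by omega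
  rw [this, List.take_add_one, hseg]
  simp

-- B's fold from position i with start s equals pcGo with the already-collected words.
lemma foldB_eq (full : List (List String)) (rest : List (List String)) (i s : Nat)
    (g : List (List String × List String)) (hs : s ≤ i) (hd : full.drop i = rest) :
    ((PySem.List.enumerate rest (i : Int)).foldl
      (fun (acc : List (List String × List String) × Int) p =>
        if PySem.List.pyGetD p.2 0 "" = "r" then
          (acc.1 ++ [(((PySem.List.slice full (some acc.2) (some p.1)).filter
                        (fun t => PySem.List.pyGetD t 0 "" = "w")).map
                        (fun t => PySem.List.pyGetD t 1 ""),
                      PySem.List.slice p.2 (some 1) none)],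
           p.1 + 1)
        else acc)
      (g, (s : Int))).1
      = g ++ pcGo rest (pcWords ((full.drop s).take (i - s))) := by
  induction rest generalizing i s g with
  | nil => simp [PySem.List.enumerate_nil, pcGo]
  | cons t ts ih =>
    rw [PySem.List.enumerate_cons]
    simp only [List.foldl_cons]
    by_cases hr : PySem.List.pyGetD t 0 "" = "r"
    · -- rule token: emit a group built from the slice [s:i], reset start to i+1
      have hslice : PySem.List.slice full (some (s : Int)) (some (i : Int))
          = (full.drop s).take (i - s) := PySem.List.slice_natCast full s i
      have hw : ¬ PySem.List.pyGetD t 0 "" = "w" := by simp [hr]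
      have hcast : (i : Int) + 1 = ((i + 1 : Nat) : Int) := by push_cast; ring
      have hd' : full.drop (i + 1) = ts := by
        rw [← List.drop_drop, hd]; rfl
      rw [if_pos hr]
      rw [hcast, ih (i + 1) (i + 1) _ (le_refl _) hd']
      simp [pcGo, hr, hslice, pcWords]
    · -- non-rule token: state unchanged, the segment grows by t
      have hcast : (i : Int) + 1 = ((i + 1 : Nat) : Int) := by push_cast; ring
      have hd' : full.drop (i + 1) = ts := by
        rw [← List.drop_drop, hd]; rfl
      rw [if_neg hr]
      rw [hcast, ih (i + 1) s _ (by omega) hd']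
      rw [take_segment_succ full s i t ts hs hd, pcWords_append]
      by_cases hw : PySem.List.pyGetD t 0 "" = "w"
      · simp [pcGo, hw, pcWords]
      · simp [pcGo, hw, hr, pcWords]

-- ===== VERDICT (by name: the statement is the Claim_ definition above) =====
theorem parse_coverage_spec : Claim_equal_parse_coverage := by
  intro coverage _ _
  unfold Spec_parse_coverage parse_coverage parse_coverage_alt
  rw [foldA_eq]
  have h := foldB_eq coverage coverage 0 0 [] (le_refl _) (by simp)
  simp only [Nat.cast_zero, Nat.sub_zero, List.drop_zero] at h
  rw [h]
  simp [pcWords]
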